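-- pv_equiv track=rewrite | github.com/Mango-Juice/Algo-Study | COS_PRO/6차/01_꽃피는_봄이_언제_오나요.py | solution
-- ===== SOURCE A (Python) =====
-- from collections import deque
--
-- def solution(n, garden):
-- 	directions = ((-1, 0), (1, 0), (0, -1), (0, 1))
-- 	answer = 0
-- 	Q = deque()
--
-- 	def spread(i, j, count):
-- 		for d in directions:
-- 			new_i = i + d[0]
-- 			new_j = j + d[1]
-- 			if new_i >= 0 and new_i < n and new_j >= 0 and new_j < n  and garden[new_i][new_j] == 0:
-- 				garden[new_i][new_j] = 1
-- 				Q.append((new_i, new_j, count + 1))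
--
-- 	for i in range(n):
-- 		for j in range(n):
-- 			if garden[i][j] == 1:
-- 				Q.append((i, j, 0))
--
-- 	while Q:
-- 		target = Q.popleft()
-- 		spread(target[0], target[1], target[2])
-- 		answer = target[2]
--
-- 	return answer
-- ===== SOURCE B (Python) =====
-- def solution(n, garden):
--     # level-synchronous bloom: collect each day's new cells by a pure scan
--     # (dedup via membership), then mark them; count days with growth.
--     # Mutates garden in place like the original.
--     frontier = [(i, j) for i in range(n) for j in range(n) if garden[i][j] == 1]
--     days = 0
--     while frontier:
--         nxt = []
--         for i, j in frontier:
--             for ni, nj in ((i - 1, j), (i + 1, j), (i, j - 1), (i, j + 1)):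
--                 if 0 <= ni < n and 0 <= nj < n and garden[ni][nj] == 0 and (ni, nj) not in nxt:
--                     nxt.append((ni, nj))
--         for ni, nj in nxt:
--             garden[ni][nj] = 1
--         if nxt:
--             days += 1
--         frontier = nxt
--     return days
-- ===== Notes on version B (the rewrite author's own statement) =====
-- stated objective: alternative
-- what changed: Replaces the count-tagged single deque (answer = count of the last popped item, grid mutated while spreading) with a level-synchronous scheme: each day's new cells are collected by a pure deduplicating scan of the current frontier's neighbours, then marked in a separate pass, and the answer counts days with growth.
import Mathlib
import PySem

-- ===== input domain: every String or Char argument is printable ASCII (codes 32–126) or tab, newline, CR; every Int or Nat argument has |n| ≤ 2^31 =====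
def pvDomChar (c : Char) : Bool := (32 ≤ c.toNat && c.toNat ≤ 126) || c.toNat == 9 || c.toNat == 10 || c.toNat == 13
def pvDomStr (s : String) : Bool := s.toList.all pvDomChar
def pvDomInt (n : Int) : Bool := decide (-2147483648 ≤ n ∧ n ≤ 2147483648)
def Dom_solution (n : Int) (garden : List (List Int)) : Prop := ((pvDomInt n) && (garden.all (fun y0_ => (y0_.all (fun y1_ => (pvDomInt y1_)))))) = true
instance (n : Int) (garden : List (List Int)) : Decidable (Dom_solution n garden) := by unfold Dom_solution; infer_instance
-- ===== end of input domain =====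

-- B replaces A's count-tagged deque (answer = count of last popped item, grid mutated while
-- spreading) by a level-synchronous scheme: each day's new cells are collected by a pure
-- deduplicating scan of the frontier's neighbours, then marked in a separate pass; the answer
-- counts days with growth. Both Pythons mutate `garden` identically in place, and the
-- equivalence proved here is about the RETURN value.

-- Shared grid primitives (cell read/write; out-of-range reads default to 1, reachable only
-- outside Pre_solution, where the Pythons raise IndexError). The loops carry a fuel argument
-- strictly above their decreasing measure: a totality guard only, never reached from the
-- entry points.
def rowZeros : List Int → Nat
  | [] => 0
  | x :: r => (if x = 0 then 1 else 0) + rowZeros r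

def zeros : List (List Int) → Nat
  | [] => 0
  | r :: g => rowZeros r + zeros g

def ggetN (g : List (List Int)) (i j : Nat) : Int := (g.getD i []).getD j 1

def gsetN : List (List Int) → Nat → Nat → Int → List (List Int)
  | [], _, _, _ => []
  | r :: g, 0, j, v => r.set j v :: g
  | r :: g, Nat.succ i, j, v => r :: gsetN g i j v

def gget (g : List (List Int)) (i j : Int) : Int := ggetN g i.toNat j.toNat
def gset (g : List (List Int)) (i j : Int) (v : Int) : List (List Int) := gsetN g i.toNat j.toNat v

-- ===== PORT A =====
def dirsPV : List (Int × Int) := [(-1, 0), (1, 0), (0, -1), (0, 1)]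

-- A's `spread(i, j, count)`: loop over directions, marking 0-neighbours at once and appending
-- (ni, nj, count+1) to the queue.
def spreadA (n i j c : Int) : List (Int × Int) → List (List Int) → List (Int × Int × Int) →
    List (List Int) × List (Int × Int × Int)
  | [], g, acc => (g, acc)
  | d :: ds, g, acc =>
    let ni := i + d.1
    let nj := j + d.2
    if 0 ≤ ni ∧ ni < n ∧ 0 ≤ nj ∧ nj < n ∧ gget g ni nj = 0 then
      spreadA n i j c ds (gset g ni nj 1) (acc ++ [(ni, nj, c + 1)])
    else
      spreadA n i j c ds g acc

-- the initial scan: for i in range(n): for j in range(n): if garden[i][j]==1: Q.append((i,j,0))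
def initQA (n : Int) (g : List (List Int)) : List (Int × Int × Int) :=
  (PySem.List.pyRange 0 n 1).foldl
    (fun q i =>
      (PySem.List.pyRange 0 n 1).foldl
        (fun q j => if gget g i j = 1 then q ++ [(i, j, (0 : Int))] else q) q)
    []

-- while Q: target = Q.popleft(); spread(...); answer = target[2]
def loopA (n : Int) : Nat → List (List Int) → List (Int × Int × Int) → Int → Int
  | 0, _, _, ans => ans
  | _ + 1, _, [], ans => ans
  | fuel + 1, g, t :: rest, _ =>
    let r := spreadA n t.1 t.2.1 t.2.2 dirsPV g []
    loopA n fuel r.1 (rest ++ r.2) t.2.2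

def solution (n : Int) (garden : List (List Int)) : Int :=
  let q := initQA n garden
  loopA n (2 * zeros garden + q.length + 1) garden q 0

-- ===== PORT B =====
-- the four neighbour candidates ((i-1,j),(i+1,j),(i,j-1),(i,j+1)) of one frontier cell
def nbrsOf (i j : Int) : List (Int × Int) := [(i - 1, j), (i + 1, j), (i, j - 1), (i, j + 1)]

-- inner loop of the collection scan: append each in-bounds 0-cell not yet collected
def collectOne (n : Int) (g : List (List Int)) : List (Int × Int) → List (Int × Int) →
    List (Int × Int)
  | [], acc => acc
  | p :: ps, acc =>
    if 0 ≤ p.1 ∧ p.1 < n ∧ 0 ≤ p.2 ∧ p.2 < n ∧ gget g p.1 p.2 = 0 ∧ ¬ p ∈ acc then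
      collectOne n g ps (acc ++ [p])
    else
      collectOne n g ps acc

-- for (i, j) in frontier: scan its four neighbour candidates
def collectLevel (n : Int) (g : List (List Int)) : List (Int × Int) → List (Int × Int) →
    List (Int × Int)
  | [], acc => acc
  | f :: fs, acc => collectLevel n g fs (collectOne n g (nbrsOf f.1 f.2) acc)

-- for (ni, nj) in nxt: garden[ni][nj] = 1
def markAll (g : List (List Int)) (L : List (Int × Int)) : List (List Int) :=
  L.foldl (fun g p => gset g p.1 p.2 1) g

-- while frontier: nxt = collect; mark nxt; if nxt: days += 1; frontier = nxt
def loopC (n : Int) : Nat → List (List Int) → List (Int × Int) → Int → Int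
  | 0, _, _, d => d
  | _ + 1, _, [], d => d
  | fuel + 1, g, F, d =>
    let nx := collectLevel n g F []
    loopC n fuel (markAll g nx) nx (if nx = [] then d else d + 1)

-- the initial comprehension [(i,j) for i in range(n) for j in range(n) if garden[i][j]==1]
def initC (n : Int) (g : List (List Int)) : List (Int × Int) :=
  (PySem.List.pyRange 0 n 1).flatMap
    (fun i => (PySem.List.pyRange 0 n 1).filterMap
      (fun j => if gget g i j = 1 then some (i, j) else none))

def solution_alt (n : Int) (garden : List (List Int)) : Int :=
  let F := initC n garden
  loopC n (zeros garden + F.length + 1) garden F 0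

-- ===== PRECONDITION & SPEC =====
-- Pre_ excludes exactly the grids too small for n (fewer than n rows, or one of the first n rows
-- shorter than n), on which both Pythons raise IndexError.
def Pre_solution (n : Int) (garden : List (List Int)) : Prop :=
  n.toNat ≤ garden.length ∧ ∀ r ∈ garden.take n.toNat, n.toNat ≤ r.length
instance (n : Int) (garden : List (List Int)) : Decidable (Pre_solution n garden) := by
  unfold Pre_solution; infer_instance

def pvWitness_solution : Int × List (List Int) := (2, [[1, 0], [0, 0]])

def Spec_solution (n : Int) (garden : List (List Int)) (out : Int) : Prop := out = solution_alt n garden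
instance (n : Int) (garden : List (List Int)) (out : Int) : Decidable (Spec_solution n garden out) := by unfold Spec_solution; infer_instance

-- ===== CLAIM (what is proved, stated in full; the proofs are below) =====
def Claim_equal_solution : Prop := ∀ (n : Int) (garden : List (List Int)), Dom_solution n garden → Pre_solution n garden → Spec_solution n garden (solution n garden)

-- ===== LEMMAS AND PROOFS =====

-- Proof-side intermediate form of the level-synchronous loop: the collection interleaved with
-- the marking (as A does inside one level). The main proof shows A's queue run equals this
-- interleaved run (loop_main), and the interleaved run equals B's collect-then-mark run
-- (loopC_eq_loopB).
def spreadB (n i j : Int) : List (Int × Int) → List (List Int) → List (Int × Int) →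
    List (List Int) × List (Int × Int)
  | [], g, acc => (g, acc)
  | d :: ds, g, acc =>
    let ni := i + d.1
    let nj := j + d.2
    if 0 ≤ ni ∧ ni < n ∧ 0 ≤ nj ∧ nj < n ∧ gget g ni nj = 0 then
      spreadB n i j ds (gset g ni nj 1) (acc ++ [(ni, nj)])
    else
      spreadB n i j ds g acc

def levelB (n : Int) : List (Int × Int) → List (List Int) → List (Int × Int) →
    List (List Int) × List (Int × Int)
  | [], g, nxt => (g, nxt)
  | f :: fs, g, nxt =>
    let r := spreadB n f.1 f.2 dirsPV g nxt
    levelB n fs r.1 r.2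

def initFB (n : Int) (g : List (List Int)) : List (Int × Int) :=
  (PySem.List.pyRange 0 n 1).foldl
    (fun q i =>
      (PySem.List.pyRange 0 n 1).foldl
        (fun q j => if gget g i j = 1 then q ++ [(i, j)] else q) q)
    []

def loopB (n : Int) : Nat → List (List Int) → List (Int × Int) → Int → Int
  | 0, _, _, dist => dist
  | _ + 1, _, [], dist => dist
  | fuel + 1, g, F, dist =>
    let r := levelB n F g []
    loopB n fuel r.1 r.2 (if r.2 = [] then dist else dist + 1)

theorem spreadA_meas (n i j c : Int) : ∀ (ds : List (Int × Int)) (g : List (List Int))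
    (acc : List (Int × Int × Int)),
    zeros (spreadA n i j c ds g acc).1 + (spreadA n i j c ds g acc).2.length
      = zeros g + acc.length := by
  intro ds
  induction ds with
  | nil => intro g acc; simp [spreadA]
  | cons d ds ih =>
    intro g acc
    simp only [spreadA]
    split
    · rename_i h
      rw [ih]
      have hz : zeros (gset g (i + d.1) (j + d.2) 1) + 1 = zeros g := by
        have h0 : gget g (i + d.1) (j + d.2) = 0 := h.2.2.2.2
        revert h0
        unfold gget gset ggetN
        generalize (i + d.1).toNat = a
        generalize (j + d.2).toNat = b
        clear h
        induction g generalizing a with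
        | nil => intro h0; simp [List.getD] at h0
        | cons r g ihg =>
          intro h0
          cases a with
          | zero =>
            simp only [List.getD_cons_zero] at h0
            simp only [gsetN, zeros]
            have : rowZeros (r.set b 1) + 1 = rowZeros r := by
              clear ihg
              induction r generalizing b with
              | nil => simp [List.getD] at h0
              | cons x r ihr =>
                cases b with
                | zero =>
                  simp only [List.getD_cons_zero] at h0
                  simp [rowZeros, h0]
                  omega
                | succ b =>
                  simp only [List.getD_cons_succ] at h0
                  simp only [List.set, rowZeros]
                  rw [← ihr b h0]
                  omega
            omega
          | succ a =>
            simp only [List.getD_cons_succ] at h0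
            simp only [gsetN, zeros]
            rw [← ihg a h0]
            omega
      simp
      omega
    · exact ih g acc

theorem spreadB_meas (n i j : Int) : ∀ (ds : List (Int × Int)) (g : List (List Int))
    (acc : List (Int × Int)),
    zeros (spreadB n i j ds g acc).1 + (spreadB n i j ds g acc).2.length
      = zeros g + acc.length := by
  intro ds
  induction ds with
  | nil => intro g acc; simp [spreadB]
  | cons d ds ih =>
    intro g acc
    simp only [spreadB]
    split
    · rename_i h
      rw [ih]
      have := spreadA_meas n i j 0 [d] g []
      simp only [spreadA, h] at this
      simp at this
      simp
      omega
    · exact ih g acc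

theorem levelB_meas (n : Int) : ∀ (F : List (Int × Int)) (g : List (List Int))
    (acc : List (Int × Int)),
    zeros (levelB n F g acc).1 + (levelB n F g acc).2.length = zeros g + acc.length := by
  intro F
  induction F with
  | nil => intro g acc; simp [levelB]
  | cons f fs ih =>
    intro g acc
    simp only [levelB]
    rw [ih, spreadB_meas]

-- fuel irrelevance: any fuel strictly above the measure computes the same value
theorem loopA_fuel (n : Int) : ∀ (fuel fuel' : Nat) (g : List (List Int))
    (q : List (Int × Int × Int)) (a : Int),
    2 * zeros g + q.length < fuel → 2 * zeros g + q.length < fuel' →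
    loopA n fuel g q a = loopA n fuel' g q a := by
  intro fuel
  induction fuel with
  | zero => intro fuel' g q a h; omega
  | succ fuel ih =>
    intro fuel' g q a h h'
    cases fuel' with
    | zero => omega
    | succ fuel' =>
      cases q with
      | nil => rfl
      | cons t rest =>
        simp only [loopA]
        have hm := spreadA_meas n t.1 t.2.1 t.2.2 dirsPV g []
        simp only [List.length_nil, Nat.add_zero] at hm
        simp only [List.length_cons] at h h'
        apply ih
        · simp; omega
        · simp; omega

theorem loopB_fuel (n : Int) : ∀ (fuel fuel' : Nat) (g : List (List Int))
    (F : List (Int × Int)) (d : Int),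
    zeros g + F.length < fuel → zeros g + F.length < fuel' →
    loopB n fuel g F d = loopB n fuel' g F d := by
  intro fuel
  induction fuel with
  | zero => intro fuel' g F d h; omega
  | succ fuel ih =>
    intro fuel' g F d h h'
    cases fuel' with
    | zero => omega
    | succ fuel' =>
      cases F with
      | nil => rfl
      | cons f fs =>
        simp only [loopB]
        have hm := levelB_meas n (f :: fs) g []
        simp only [List.length_nil, Nat.add_zero] at hm
        simp only [List.length_cons] at h h'
        apply ih
        · omega
        · omega

-- canonical runners (fuel = measure + 1) and their one-step unfoldings
def runA (n : Int) (g : List (List Int)) (q : List (Int × Int × Int)) (a : Int) : Int :=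
  loopA n (2 * zeros g + q.length + 1) g q a

def runB (n : Int) (g : List (List Int)) (F : List (Int × Int)) (d : Int) : Int :=
  loopB n (zeros g + F.length + 1) g F d

theorem runA_nil (n : Int) (g : List (List Int)) (a : Int) : runA n g [] a = a := rfl

theorem runA_cons (n : Int) (g : List (List Int)) (t : Int × Int × Int)
    (rest : List (Int × Int × Int)) (a : Int) :
    runA n g (t :: rest) a
      = runA n (spreadA n t.1 t.2.1 t.2.2 dirsPV g []).1
          (rest ++ (spreadA n t.1 t.2.1 t.2.2 dirsPV g []).2) t.2.2 := by
  unfold runA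
  simp only [loopA]
  apply loopA_fuel
  · have hm := spreadA_meas n t.1 t.2.1 t.2.2 dirsPV g []
    simp only [List.length_nil, Nat.add_zero] at hm
    simp only [List.length_cons, List.length_append]
    omega
  · omega

theorem runB_nil (n : Int) (g : List (List Int)) (d : Int) : runB n g [] d = d := rfl

theorem runB_cons (n : Int) (g : List (List Int)) (f : Int × Int) (fs : List (Int × Int))
    (d : Int) :
    runB n g (f :: fs) d
      = runB n (levelB n (f :: fs) g []).1 (levelB n (f :: fs) g []).2
          (if (levelB n (f :: fs) g []).2 = [] then d else d + 1) := by
  unfold runB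
  simp only [loopB]
  apply loopB_fuel
  · have hm := levelB_meas n (f :: fs) g []
    simp only [List.length_nil, Nat.add_zero] at hm
    simp only [List.length_cons]
    omega
  · omega

theorem solution_eq_runA (n : Int) (g : List (List Int)) :
    solution n g = runA n g (initQA n g) 0 := rfl

-- tag a cell with its BFS level
def tagC (c : Int) (p : Int × Int) : Int × Int × Int := (p.1, p.2, c)

theorem spread_rel (n i j c : Int) : ∀ (ds : List (Int × Int)) (g : List (List Int))
    (acc : List (Int × Int)),
    spreadA n i j c ds g (acc.map (tagC (c + 1)))
      = ((spreadB n i j ds g acc).1, (spreadB n i j ds g acc).2.map (tagC (c + 1))) := by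
  intro ds
  induction ds with
  | nil => intro g acc; simp [spreadA, spreadB]
  | cons d ds ih =>
    intro g acc
    simp only [spreadA, spreadB]
    split
    · rw [← ih]
      simp [tagC]
    · exact ih g acc

theorem spreadB_acc (n i j : Int) : ∀ (ds : List (Int × Int)) (g : List (List Int))
    (acc : List (Int × Int)),
    spreadB n i j ds g acc
      = ((spreadB n i j ds g []).1, acc ++ (spreadB n i j ds g []).2) := by
  intro ds
  induction ds with
  | nil => intro g acc; simp [spreadB]
  | cons d ds ih =>
    intro g acc
    simp only [spreadB]
    split
    · rw [ih ((gset g _ _ 1)) (acc ++ _), ih ((gset g _ _ 1)) ([] ++ _)]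
      simp
    · exact ih g acc

theorem runA_ans (n : Int) (g : List (List Int)) (q : List (Int × Int × Int)) (a a' : Int)
    (h : q ≠ []) : runA n g q a = runA n g q a' := by
  cases q with
  | nil => exact absurd rfl h
  | cons t rest => rw [runA_cons, runA_cons]

-- within one level: consuming F (level c) off the queue, with N the already-built part of level c+1
theorem loop_within (n : Int) : ∀ (F : List (Int × Int)) (g : List (List Int))
    (N : List (Int × Int)) (c a : Int),
    runA n g (F.map (tagC c) ++ N.map (tagC (c + 1))) a
      = runA n (levelB n F g N).1 ((levelB n F g N).2.map (tagC (c + 1)))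
          (if F = [] then a else c) := by
  intro F
  induction F with
  | nil => intro g N c a; simp [levelB]
  | cons f fs ih =>
    intro g N c a
    simp only [List.map_cons, List.cons_append, levelB]
    rw [runA_cons]
    have hsp := spread_rel n f.1 f.2 c dirsPV g []
    simp only [List.map_nil] at hsp
    simp only [tagC, hsp]
    have hacc := spreadB_acc n f.1 f.2 dirsPV g N
    rw [hacc]
    have : fs.map (tagC c) ++ N.map (tagC (c + 1)) ++ (spreadB n f.1 f.2 dirsPV g []).2.map (tagC (c + 1))
        = fs.map (tagC c) ++ (N ++ (spreadB n f.1 f.2 dirsPV g []).2).map (tagC (c + 1)) := by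
      simp
    rw [this, ih]
    split <;> rfl

theorem loop_main (n : Int) : ∀ (z : Nat) (g : List (List Int)) (F : List (Int × Int)) (c : Int),
    zeros g ≤ z → runA n g (F.map (tagC c)) c = runB n g F c := by
  intro z
  induction z with
  | zero =>
    intro g F c hz
    cases F with
    | nil => simp only [List.map_nil]; rw [runA_nil, runB_nil]
    | cons f fs =>
      rw [runB_cons]
      have hmeas := levelB_meas n (f :: fs) g []
      have hw := loop_within n (f :: fs) g [] c c
      simp only [List.map_nil, List.append_nil] at hw
      have h2 : (levelB n (f :: fs) g []).2 = [] := by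
        have : zeros g = 0 := Nat.le_zero.mp hz
        rcases h : (levelB n (f :: fs) g []).2 with _ | ⟨x, xs⟩
        · rfl
        · rw [h] at hmeas; simp [this] at hmeas
      rw [hw, h2]
      simp [runA_nil, runB_nil]
  | succ z ih =>
    intro g F c hz
    cases F with
    | nil => simp only [List.map_nil]; rw [runA_nil, runB_nil]
    | cons f fs =>
      rw [runB_cons]
      have hmeas := levelB_meas n (f :: fs) g []
      have hw := loop_within n (f :: fs) g [] c c
      simp only [List.map_nil, List.append_nil] at hw
      rw [if_neg (List.cons_ne_nil f fs)] at hw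
      rw [hw]
      rcases h2 : (levelB n (f :: fs) g []).2 with _ | ⟨x, xs⟩
      · simp [runA_nil, runB_nil]
      · rw [h2] at hmeas
        simp only [List.length_cons, List.length_nil] at hmeas
        have hlt : zeros (levelB n (f :: fs) g []).1 ≤ z := by omega
        have hne : ((x :: xs).map (tagC (c + 1))) ≠ [] := by simp
        rw [runA_ans n _ _ c (c + 1) hne, ih _ (x :: xs) (c + 1) hlt]
        simp

theorem init_rel_aux (g : List (List Int)) (i : Int) : ∀ (l : List Int) (accF : List (Int × Int)),
    l.foldl (fun q j => if gget g i j = 1 then q ++ [(i, j, (0 : Int))] else q)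
        (accF.map (tagC 0))
      = (l.foldl (fun q j => if gget g i j = 1 then q ++ [(i, j)] else q) accF).map (tagC 0) := by
  intro l
  induction l with
  | nil => intro accF; simp
  | cons x l ih =>
    intro accF
    simp only [List.foldl_cons]
    split
    · rw [← ih]; simp [tagC]
    · exact ih accF

theorem init_rel (n : Int) (g : List (List Int)) :
    initQA n g = (initFB n g).map (tagC 0) := by
  unfold initQA initFB
  generalize PySem.List.pyRange 0 n 1 = l
  have : ∀ (l' : List Int) (accF : List (Int × Int)),
      l'.foldl (fun q i => (l.foldl (fun q j => if gget g i j = 1 then q ++ [(i, j, (0:Int))] else q) q)) (accF.map (tagC 0))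
        = (l'.foldl (fun q i => (l.foldl (fun q j => if gget g i j = 1 then q ++ [(i, j)] else q) q)) accF).map (tagC 0) := by
    intro l'
    induction l' with
    | nil => intro accF; simp
    | cons x l' ih =>
      intro accF
      simp only [List.foldl_cons]
      rw [init_rel_aux g x l accF, ih]
  have h0 := this l []
  simpa using h0

-- ---- bridge: B's collect-then-mark level equals the interleaved level ----

-- cell read/write pointwise lemmas (Nat level)
theorem ggetN_gsetN_self : ∀ (g : List (List Int)) (a b : Nat) (v : Int),
    ggetN g a b = 0 → ggetN (gsetN g a b v) a b = v := by
  intro g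
  induction g with
  | nil => intro a b v h; simp [ggetN, List.getD] at h
  | cons r g ih =>
    intro a b v h
    cases a with
    | zero =>
      simp only [ggetN, List.getD_cons_zero] at h ⊢
      simp only [gsetN, List.getD_cons_zero]
      have hb : b < r.length := by
        by_contra hb
        rw [List.getD_eq_getElem?_getD, List.getElem?_eq_none (by omega)] at h
        simp at h
      rw [List.getD_eq_getElem?_getD, List.getElem?_set_self (by omega)]
      simp
    | succ a =>
      simp only [ggetN, List.getD_cons_succ] at h ⊢
      simp only [gsetN, List.getD_cons_succ]
      exact ih a b v h

theorem ggetN_gsetN_ne : ∀ (g : List (List Int)) (a b a' b' : Nat) (v : Int),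
    ¬ (a = a' ∧ b = b') → ggetN (gsetN g a b v) a' b' = ggetN g a' b' := by
  intro g
  induction g with
  | nil => intro a b a' b' v _; cases a <;> simp [gsetN]
  | cons r g ih =>
    intro a b a' b' v h
    cases a with
    | zero =>
      cases a' with
      | zero =>
        have hb : b ≠ b' := by intro he; exact h ⟨rfl, he⟩
        simp only [gsetN, ggetN, List.getD_cons_zero]
        rw [List.getD_eq_getElem?_getD, List.getD_eq_getElem?_getD,
          List.getElem?_set_ne (by omega)]
      | succ a' => simp [gsetN, ggetN]
    | succ a =>
      cases a' with
      | zero => simp [gsetN, ggetN]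
      | succ a' =>
        simp only [gsetN, ggetN, List.getD_cons_succ]
        exact ih a b a' b' v (by intro he; exact h ⟨by omega, he.2⟩)

theorem gget_gset_self (g : List (List Int)) (i j : Int) (v : Int)
    (h : gget g i j = 0) : gget (gset g i j v) i j = v :=
  ggetN_gsetN_self g i.toNat j.toNat v h

theorem gget_gset_ne (g : List (List Int)) (i j i' j' v : Int)
    (hi : 0 ≤ i) (hj : 0 ≤ j) (hi' : 0 ≤ i') (hj' : 0 ≤ j')
    (h : ¬ ((i, j) = (i', j'))) : gget (gset g i j v) i' j' = gget g i' j' := by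
  apply ggetN_gsetN_ne
  intro he
  apply h
  have h1 : i = i' := by omega
  have h2 : j = j' := by omega
  rw [h1, h2]

theorem markAll_append (g : List (List Int)) (L : List (Int × Int)) (p : Int × Int) :
    markAll g (L ++ [p]) = gset (markAll g L) p.1 p.2 1 := by
  simp [markAll]

-- the invariant tying the pure accumulator to the interleaved grid
def InvC (g : List (List Int)) (acc : List (Int × Int)) (g' : List (List Int)) : Prop :=
  g' = markAll g acc
  ∧ (∀ p ∈ acc, 0 ≤ p.1 ∧ 0 ≤ p.2 ∧ gget g p.1 p.2 = 0)
  ∧ (∀ p : Int × Int, 0 ≤ p.1 → 0 ≤ p.2 →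
      (gget g' p.1 p.2 = 0 ↔ (gget g p.1 p.2 = 0 ∧ ¬ p ∈ acc)))

theorem InvC_init (g : List (List Int)) : InvC g [] g := by
  refine ⟨by simp [markAll], by simp, ?_⟩
  intro p _ _
  simp

theorem InvC_step (g : List (List Int)) (acc : List (Int × Int)) (g' : List (List Int))
    (p : Int × Int) (hinv : InvC g acc g') (hp1 : 0 ≤ p.1) (hp2 : 0 ≤ p.2)
    (h0 : gget g' p.1 p.2 = 0) :
    InvC g (acc ++ [p]) (gset g' p.1 p.2 1) := by
  obtain ⟨hg, hel, hch⟩ := hinv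
  have hp0 : gget g p.1 p.2 = 0 ∧ ¬ p ∈ acc := (hch p hp1 hp2).mp h0
  refine ⟨by rw [hg, markAll_append], ?_, ?_⟩
  · intro q hq
    rcases List.mem_append.mp hq with hq | hq
    · exact hel q hq
    · simp at hq; subst hq; exact ⟨hp1, hp2, hp0.1⟩
  · intro q hq1 hq2
    by_cases hqp : q = p
    · subst hqp
      rw [gget_gset_self g' q.1 q.2 1 h0]
      simp
    · rw [gget_gset_ne g' p.1 p.2 q.1 q.2 1 hp1 hp2 hq1 hq2
        (by intro he; exact hqp (by rw [Prod.ext_iff] at he ⊢; exact ⟨he.1.symm, he.2.symm⟩))]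
      rw [hch q hq1 hq2]
      simp [hqp]

-- one cell's scan: the pure dedup scan over explicit candidates matches the interleaved spread
theorem collect_spread (n : Int) (i j : Int) : ∀ (ds : List (Int × Int)) (g : List (List Int))
    (acc : List (Int × Int)) (g' : List (List Int)), InvC g acc g' →
    (spreadB n i j ds g' acc).2 = collectOne n g (ds.map (fun d => (i + d.1, j + d.2))) acc
    ∧ InvC g (spreadB n i j ds g' acc).2 (spreadB n i j ds g' acc).1 := by
  intro ds
  induction ds with
  | nil => intro g acc g' hinv; exact ⟨rfl, hinv⟩
  | cons d ds ih =>
    intro g acc g' hinv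
    simp only [spreadB, List.map_cons, collectOne]
    have hcond : (0 ≤ i + d.1 ∧ i + d.1 < n ∧ 0 ≤ j + d.2 ∧ j + d.2 < n
        ∧ gget g' (i + d.1) (j + d.2) = 0)
        ↔ (0 ≤ i + d.1 ∧ i + d.1 < n ∧ 0 ≤ j + d.2 ∧ j + d.2 < n
        ∧ gget g (i + d.1) (j + d.2) = 0 ∧ ¬ (i + d.1, j + d.2) ∈ acc) := by
      constructor
      · rintro ⟨h1, h2, h3, h4, h5⟩
        have := (hinv.2.2 (i + d.1, j + d.2) h1 h3).mp h5
        exact ⟨h1, h2, h3, h4, this.1, this.2⟩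
      · rintro ⟨h1, h2, h3, h4, h5, h6⟩
        exact ⟨h1, h2, h3, h4, (hinv.2.2 (i + d.1, j + d.2) h1 h3).mpr ⟨h5, h6⟩⟩
    by_cases hc : 0 ≤ i + d.1 ∧ i + d.1 < n ∧ 0 ≤ j + d.2 ∧ j + d.2 < n
        ∧ gget g' (i + d.1) (j + d.2) = 0
    · rw [if_pos hc, if_pos (hcond.mp hc)]
      exact ih g (acc ++ [(i + d.1, j + d.2)]) (gset g' (i + d.1) (j + d.2) 1)
        (InvC_step g acc g' (i + d.1, j + d.2) hinv hc.1 hc.2.2.1 hc.2.2.2.2)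
    · rw [if_neg hc, if_neg (fun h => hc (hcond.mpr h))]
      exact ih g acc g' hinv

theorem nbrs_map (i j : Int) :
    dirsPV.map (fun d => (i + d.1, j + d.2)) = nbrsOf i j := by
  simp only [dirsPV, nbrsOf, List.map_cons, List.map_nil]
  norm_num
  omega

-- one level's scan: the pure collection plus batch marking matches the interleaved level
theorem collect_level (n : Int) : ∀ (F : List (Int × Int)) (g : List (List Int))
    (acc : List (Int × Int)) (g' : List (List Int)), InvC g acc g' →
    (levelB n F g' acc).2 = collectLevel n g F acc
    ∧ InvC g (levelB n F g' acc).2 (levelB n F g' acc).1 := by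
  intro F
  induction F with
  | nil => intro g acc g' hinv; exact ⟨rfl, hinv⟩
  | cons f fs ih =>
    intro g acc g' hinv
    simp only [levelB, collectLevel]
    have hone := collect_spread n f.1 f.2 dirsPV g acc g' hinv
    rw [nbrs_map f.1 f.2] at hone
    obtain ⟨he, hinv'⟩ := hone
    have hrec := ih g (collectOne n g (nbrsOf f.1 f.2) acc) (spreadB n f.1 f.2 dirsPV g' acc).1
      (he ▸ hinv')
    rw [he]
    exact hrec

theorem level_bridge (n : Int) (g : List (List Int)) (F : List (Int × Int)) :
    (levelB n F g []).2 = collectLevel n g F []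
    ∧ (levelB n F g []).1 = markAll g (collectLevel n g F []) := by
  have h := collect_level n F g [] g (InvC_init g)
  exact ⟨h.1, by rw [← h.1]; exact h.2.1⟩

theorem loopC_eq_loopB (n : Int) : ∀ (fuel : Nat) (g : List (List Int))
    (F : List (Int × Int)) (d : Int), loopC n fuel g F d = loopB n fuel g F d := by
  intro fuel
  induction fuel with
  | zero => intro g F d; rfl
  | succ fuel ih =>
    intro g F d
    cases F with
    | nil => rfl
    | cons f fs =>
      simp only [loopC, loopB]
      obtain ⟨h2, h1⟩ := level_bridge n g (f :: fs)
      rw [h2, h1, ih]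

theorem init_eq_aux (g : List (List Int)) (i : Int) : ∀ (l : List Int) (acc : List (Int × Int)),
    l.foldl (fun q j => if gget g i j = 1 then q ++ [(i, j)] else q) acc
      = acc ++ l.filterMap (fun j => if gget g i j = 1 then some (i, j) else none) := by
  intro l
  induction l with
  | nil => intro acc; simp
  | cons x l ih =>
    intro acc
    simp only [List.foldl_cons, List.filterMap_cons]
    split
    · rw [ih]; simp
    · rw [ih]

theorem init_eq (n : Int) (g : List (List Int)) : initFB n g = initC n g := by
  unfold initFB initC
  have key : ∀ (l' : List Int) (acc : List (Int × Int)),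
      l'.foldl (fun q i => (PySem.List.pyRange 0 n 1).foldl
          (fun q j => if gget g i j = 1 then q ++ [(i, j)] else q) q) acc
        = acc ++ l'.flatMap (fun i => (PySem.List.pyRange 0 n 1).filterMap
            (fun j => if gget g i j = 1 then some (i, j) else none)) := by
    intro l'
    induction l' with
    | nil => intro acc; simp
    | cons x l' ih =>
      intro acc
      simp only [List.foldl_cons, List.flatMap_cons]
      rw [init_eq_aux g x _ acc, ih]
      simp
  simpa using key (PySem.List.pyRange 0 n 1) []

theorem solution_alt_eq_runB (n : Int) (g : List (List Int)) :
    solution_alt n g = runB n g (initFB n g) 0 := by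
  unfold solution_alt runB
  rw [← init_eq n g, loopC_eq_loopB]

-- ===== VERDICT (by name: the statement is the Claim_ definition above) =====
theorem solution_spec : Claim_equal_solution := by
  intro n garden _ _
  unfold Spec_solution
  rw [solution_eq_runA, solution_alt_eq_runB, init_rel n garden]
  exact loop_main n (zeros garden) garden (initFB n garden) 0 le_rfl
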